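-- pv_equiv track=rewrite | github.com/squirrelabbit/analysis-agent-platform | workers/python-ai/src/python_ai_worker/runtime/artifacts.py | _cluster_similarity_backend
-- ===== SOURCE A (Python) =====
-- from typing import Any
--
-- def _cluster_similarity_backend(value: Any) -> str:
--     if not isinstance(value, set):
--         return "token-overlap"
--     normalized = {str(item).strip() for item in value if str(item).strip()}
--     if normalized == {"dense-only"}:
--         return "dense-only"
--     if normalized == {"dense-hybrid"}:
--         return "dense-hybrid"
--     if normalized == {"token-overlap"} or not normalized:
--         return "token-overlap"
--     return "mixed"
-- ===== SOURCE B (Python) =====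
-- def _cluster_similarity_backend(value) -> str:
--     if not isinstance(value, set):
--         return "token-overlap"
--     # Single pass, no set built: remember the first non-empty stripped value;
--     # a second distinct one means "mixed" immediately. Order of iteration
--     # cannot affect the result.
--     sole = None
--     for item in value:
--         s = str(item).strip()
--         if not s:
--             continue
--         if sole is None:
--             sole = s
--         elif s != sole:
--             return "mixed"
--     if sole is None or sole == "token-overlap":
--         return "token-overlap"
--     if sole in ("dense-only", "dense-hybrid"):
--         return sole
--     return "mixed"
-- ===== Notes on version B (the rewrite author's own statement) =====
-- stated objective: faster
-- what changed: Instead of materialising the normalized set and comparing it against three singleton-set literals, B streams the elements once through a state machine (first non-empty stripped value, early exit to 'mixed' on a second distinct one) and classifies the surviving sole value afterwards; no set is ever built.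
import Mathlib
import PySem

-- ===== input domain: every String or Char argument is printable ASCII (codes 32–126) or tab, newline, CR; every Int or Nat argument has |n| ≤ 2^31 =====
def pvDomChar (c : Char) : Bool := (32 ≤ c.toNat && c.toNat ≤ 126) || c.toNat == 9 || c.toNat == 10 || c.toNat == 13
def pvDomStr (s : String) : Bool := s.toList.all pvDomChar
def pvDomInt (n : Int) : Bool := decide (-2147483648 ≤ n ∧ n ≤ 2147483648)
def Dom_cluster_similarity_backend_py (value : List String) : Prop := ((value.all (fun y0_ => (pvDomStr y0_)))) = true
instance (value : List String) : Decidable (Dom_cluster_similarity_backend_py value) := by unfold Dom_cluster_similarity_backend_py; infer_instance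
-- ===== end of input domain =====

-- B replaces A's build-a-set-then-compare-with-singleton-literals logic by a single streaming
-- pass with an early 'mixed' exit and no set at all (alternative decomposition, same cost).

-- ===== PORT A =====
-- 'value' is a Python set (distinct elements); the set comprehension and the whole-set
-- equality tests are order-independent, so folding over the list is exact.
def cluster_similarity_backend_py (value : List String) : String :=
  let normalized : PySem.Set String :=
    value.foldl (fun s item =>
      if PySem.Str.strip item ≠ "" then PySem.Set.add s (PySem.Str.strip item) else s)
      PySem.Set.empty
  if PySem.Set.equal normalized ["dense-only"] then "dense-only"
  else if PySem.Set.equal normalized ["dense-hybrid"] then "dense-hybrid"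
  else if PySem.Set.equal normalized ["token-overlap"] || normalized.isEmpty then "token-overlap"
  else "mixed"

-- ===== PORT B =====
-- Source B's for-loop with its early 'return "mixed"': 'some acc' = the loop fell through with
-- sole = acc, 'none' = the loop returned "mixed" early. The loop iterates over a Python set,
-- but its outcome depends only on the set of non-empty stripped values, never on iteration
-- order, so folding the element list is exact.
def pvAltLoop : List String → Option String → Option (Option String)
  | [], acc => some acc
  | item :: rest, acc =>
      let s := PySem.Str.strip item
      if s = "" then pvAltLoop rest acc
      else
        match acc with
        | none => pvAltLoop rest (some s)
        | some sole => if s ≠ sole then none else pvAltLoop rest acc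

def cluster_similarity_backend_py_alt (value : List String) : String :=
  match pvAltLoop value none with
  | none => "mixed"
  | some none => "token-overlap"
  | some (some sole) =>
      if sole = "token-overlap" then "token-overlap"
      else if sole = "dense-only" || sole = "dense-hybrid" then sole
      else "mixed"

-- ===== PRECONDITION & SPEC =====
def Spec_cluster_similarity_backend_py (value : List String) (out : String) : Prop := out = cluster_similarity_backend_py_alt value
instance (value : List String) (out : String) : Decidable (Spec_cluster_similarity_backend_py value out) := by unfold Spec_cluster_similarity_backend_py; infer_instance

-- ===== CLAIM (what is proved, stated in full; the proofs are below) =====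
def Claim_equal_cluster_similarity_backend_py : Prop := ∀ (value : List String), Dom_cluster_similarity_backend_py value → Spec_cluster_similarity_backend_py value (cluster_similarity_backend_py value)

-- ===== LEMMAS AND PROOFS =====

-- abbreviations for the two sides' pieces (proof-only)
def pvFold (l : List String) (s : PySem.Set String) : PySem.Set String :=
  l.foldl (fun s item =>
    if PySem.Str.strip item ≠ "" then PySem.Set.add s (PySem.Str.strip item) else s) s

def pvDispatchA (n : PySem.Set String) : String :=
  if PySem.Set.equal n ["dense-only"] then "dense-only"
  else if PySem.Set.equal n ["dense-hybrid"] then "dense-hybrid"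
  else if PySem.Set.equal n ["token-overlap"] || n.isEmpty then "token-overlap"
  else "mixed"

def pvFinishB (r : Option (Option String)) : String :=
  match r with
  | none => "mixed"
  | some none => "token-overlap"
  | some (some sole) =>
      if sole = "token-overlap" then "token-overlap"
      else if sole = "dense-only" || sole = "dense-hybrid" then sole
      else "mixed"

-- the fold preserves Nodup
theorem pv_nodup_fold (l : List String) (s : List String) (hs : s.Nodup) :
    (pvFold l s).Nodup := by
  induction l generalizing s with
  | nil => exact hs
  | cons a t ih =>
      simp only [pvFold, List.foldl_cons]
      split
      · exact ih _ (PySem.Set.nodup_add _ _ hs)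
      · exact ih _ hs

-- the fold preserves membership
theorem pv_mem_fold (l : List String) (s : List String) (x : String) (hx : x ∈ s) :
    x ∈ pvFold l s := by
  induction l generalizing s with
  | nil => exact hx
  | cons a t ih =>
      simp only [pvFold, List.foldl_cons]
      split
      · exact ih _ ((PySem.Set.mem_add _ _ _).mpr (Or.inl hx))
      · exact ih _ hx

-- a Nodup set with two elements cannot be empty or equal a singleton: A dispatches to "mixed"
theorem pv_dispatch_big (n : List String) (hn : n.Nodup) (a b : String)
    (ha : a ∈ n) (hb : b ∈ n) (hab : a ≠ b) : pvDispatchA n = "mixed" := by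
  have hne : ∀ x : String, PySem.Set.equal n [x] = false := by
    intro x
    cases heq : PySem.Set.equal n [x] with
    | false => rfl
    | true =>
        have h := (PySem.Set.equal_iff n [x]).mp heq
        have h1 : a = x := by simpa using (h a).mp ha
        have h2 : b = x := by simpa using (h b).mp hb
        exact absurd (h1.trans h2.symm) hab
  have hemp : n.isEmpty = false := by
    cases n with
    | nil => cases ha
    | cons _ _ => rfl
  simp [pvDispatchA, hne, hemp]

-- A's dispatch on a singleton equals B's finish on the surviving sole value
theorem pv_single (x : String) : pvDispatchA [x] = pvFinishB (some (some x)) := by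
  by_cases h1 : x = "dense-only"
  · subst h1; decide
  by_cases h2 : x = "dense-hybrid"
  · subst h2; decide
  by_cases h3 : x = "token-overlap"
  · subst h3; decide
  have hne : ∀ y : String, x ≠ y → PySem.Set.equal [x] [y] = false := by
    intro y hxy
    cases heq : PySem.Set.equal [x] [y] with
    | false => rfl
    | true =>
        have h := (PySem.Set.equal_iff [x] [y]).mp heq
        exact absurd (by simpa using (h x).mp (by simp)) hxy
  simp [pvDispatchA, pvFinishB, hne _ h1, hne _ h2, hne _ h3, h1, h2, h3]

-- proof-only: the value B produces from loop-state s (as the accumulator's set of seen values)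
def pvRHS (s : List String) (l : List String) : String :=
  match s with
  | [] => pvFinishB (pvAltLoop l none)
  | [x] => pvFinishB (pvAltLoop l (some x))
  | _ => "mixed"

-- the core invariant: A's fold-then-dispatch tracks B's loop, for every accumulator shape
theorem pv_main (l : List String) (s : List String) (hs : s.Nodup) :
    pvDispatchA (pvFold l s) = pvRHS s l := by
  induction l generalizing s with
  | nil =>
      match s, hs with
      | [], _ => decide
      | [x], _ => simpa [pvRHS, pvAltLoop] using pv_single x
      | a :: b :: u, hn =>
          exact pv_dispatch_big _ hn a b (List.mem_cons_self ..) (List.mem_cons_of_mem _ (List.mem_cons_self ..)) (by simp at hn; tauto)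
  | cons item rest ih =>
      simp only [pvFold, List.foldl_cons]
      by_cases hst : PySem.Str.strip item = ""
      · match s, hs with
        | [], _ => simpa [hst, pvFold, pvRHS, pvAltLoop] using ih [] (by simp)
        | [x], _ => simpa [hst, pvFold, pvRHS, pvAltLoop] using ih [x] (by simp)
        | a :: b :: u, hn => simpa [hst, pvFold, pvRHS, pvAltLoop] using ih (a :: b :: u) hn
      · match s, hs with
        | [], _ =>
            have hadd : PySem.Set.add ([] : List String) (PySem.Str.strip item)
                = [PySem.Str.strip item] := by simp [PySem.Set.add, PySem.Set.contains]
            have := ih [PySem.Str.strip item] (by simp)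
            simp only [pvFold] at this
            simpa [hst, hadd, pvFold, pvRHS, pvAltLoop] using this
        | [x], _ =>
            by_cases hx : PySem.Str.strip item = x
            · have hadd : PySem.Set.add [x] (PySem.Str.strip item) = [x] := by
                simp [PySem.Set.add, PySem.Set.contains, hx]
              have := ih [x] (by simp)
              simp only [pvFold] at this
              simpa [hst, hx, hadd, pvFold, pvRHS, pvAltLoop] using this
            · have hadd : PySem.Set.add [x] (PySem.Str.strip item)
                  = [x, PySem.Str.strip item] := by
                simp [PySem.Set.add, PySem.Set.contains, hx]
              have := ih [x, PySem.Str.strip item] (by simp [Ne.symm hx])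
              simp only [pvFold] at this
              simpa [hst, hx, hadd, pvFold, pvRHS, pvAltLoop] using this
        | a :: b :: u, hn =>
            have hab : a ≠ b := by simp at hn; tauto
            have hnd : (PySem.Set.add (a :: b :: u) (PySem.Str.strip item)).Nodup :=
              PySem.Set.nodup_add _ _ hn
            have hmema : a ∈ PySem.Set.add (a :: b :: u) (PySem.Str.strip item) :=
              (PySem.Set.mem_add _ _ _).mpr (Or.inl (by simp))
            have hmemb : b ∈ PySem.Set.add (a :: b :: u) (PySem.Str.strip item) :=
              (PySem.Set.mem_add _ _ _).mpr (Or.inl (by simp))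
            have := pv_dispatch_big
              (pvFold rest (PySem.Set.add (a :: b :: u) (PySem.Str.strip item)))
              (pv_nodup_fold _ _ hnd) a b (pv_mem_fold _ _ _ hmema) (pv_mem_fold _ _ _ hmemb) hab
            simp only [pvFold] at this
            simpa [hst, pvFold, pvRHS] using this

-- ===== VERDICT (by name: the statement is the Claim_ definition above) =====
theorem cluster_similarity_backend_py_spec : Claim_equal_cluster_similarity_backend_py := by
  intro value _
  unfold Spec_cluster_similarity_backend_py cluster_similarity_backend_py cluster_similarity_backend_py_alt
  have h := pv_main value [] List.nodup_nil
  simpa [pvFold, pvDispatchA, pvFinishB, pvRHS, pvAltLoop, PySem.Set.empty] using h
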